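-- pv_equiv track=rewrite | github.com/viagostini/chess-AI | utils.py | convert_board_to_unicode
-- ===== SOURCE A (Python) =====
-- def convert_board_to_unicode(str_board):
--     symbols = {
--         'r': '♜', 'R': '♖',
--         'n': '♞', 'N': '♘',
--         'b': '♝', 'B': '♗',
--         'q': '♛', 'Q': '♕',
--         'k': '♚', 'K': '♔',
--         'p': '♟︎', 'P': '♙',
--     }
--
--     for piece, symbol in symbols.items():
--         str_board = str_board.replace(piece, symbol)
--
--     return str_board
-- ===== SOURCE B (Python) =====
-- def convert_board_to_unicode(str_board):
--     pieces = 'rRnNbBqQkKpP'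
--     glyphs = ['\u265c', '\u2656', '\u265e', '\u2658', '\u265d', '\u2657',
--               '\u265b', '\u2655', '\u265a', '\u2654', '\u265f\ufe0e', '\u2659']
--     out = []
--     for c in str_board:
--         i = pieces.find(c)
--         out.append(c if i < 0 else glyphs[i])
--     return ''.join(out)
-- ===== Notes on version B (the rewrite author's own statement) =====
-- stated objective: alternative
-- what changed: B makes one pass over the characters of str_board, looking each up by position in a piece-letter string indexed against a parallel glyph list and joining the pieces, instead of A's twelve sequential full-string .replace scans.
import Mathlib
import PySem

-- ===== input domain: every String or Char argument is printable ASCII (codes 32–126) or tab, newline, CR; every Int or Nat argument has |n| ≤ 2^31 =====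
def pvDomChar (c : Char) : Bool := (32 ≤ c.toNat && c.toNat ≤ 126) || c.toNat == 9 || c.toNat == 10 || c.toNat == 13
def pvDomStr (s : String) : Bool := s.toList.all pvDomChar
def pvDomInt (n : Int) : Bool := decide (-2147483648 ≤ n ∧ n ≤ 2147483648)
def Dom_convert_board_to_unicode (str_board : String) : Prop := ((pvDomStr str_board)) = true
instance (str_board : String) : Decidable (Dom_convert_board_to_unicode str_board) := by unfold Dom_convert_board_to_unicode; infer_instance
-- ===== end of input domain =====

-- B replaces A's twelve sequential full-string .replace passes by a single pass that positions
-- each character in the piece-letter string "rRnNbBqQkKpP" and picks the glyph from a parallel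
-- list (keeping the character itself when absent); objective: alternative.

-- ===== PORT A =====
def convert_board_to_unicode (str_board : String) : String :=
  let symbols : PySem.Dict String String := PySem.Dict.mk
    [("r", "♜"), ("R", "♖"), ("n", "♞"), ("N", "♘"), ("b", "♝"), ("B", "♗"),
     ("q", "♛"), ("Q", "♕"), ("k", "♚"), ("K", "♔"), ("p", "♟︎"), ("P", "♙")]
  symbols.items.foldl (fun sb ps => PySem.Str.replace sb ps.1 ps.2) str_board

-- ===== PORT B =====
-- glyphs[i] : when 0 ≤ i here, i = pieces.find(c) < 12 = glyphs.length, so Python's indexing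
-- never raises; (pyGet? …).getD "" is exact on that reachable range.
def convert_board_to_unicode_alt (str_board : String) : String :=
  let pieces : String := "rRnNbBqQkKpP"
  let glyphs : List String := ["♜", "♖", "♞", "♘", "♝", "♗", "♛", "♕", "♚", "♔", "♟︎", "♙"]
  let out := str_board.toList.foldl (fun out c =>
    let i := PySem.Str.find pieces (String.singleton c)
    out ++ [if i < 0 then String.singleton c else (PySem.List.pyGet? glyphs i).getD ""]) []
  PySem.Str.join "" out

-- ===== PRECONDITION & SPEC =====
def Spec_convert_board_to_unicode (str_board : String) (out : String) : Prop := out = convert_board_to_unicode_alt str_board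
instance (str_board : String) (out : String) : Decidable (Spec_convert_board_to_unicode str_board out) := by unfold Spec_convert_board_to_unicode; infer_instance

-- ===== CLAIM (what is proved, stated in full; the proofs are below) =====
def Claim_equal_convert_board_to_unicode : Prop := ∀ (str_board : String), Dom_convert_board_to_unicode str_board → Spec_convert_board_to_unicode str_board (convert_board_to_unicode str_board)

-- ===== LEMMAS AND PROOFS =====
theorem join_nil_flatten (l : List (List Char)) : PySem.Chars.join [] l = l.flatten := by
  simp only [PySem.Chars.join, List.intercalate]
  induction l with
  | nil => simp
  | cons a t ih => cases t <;> simp_all [List.intersperse]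

theorem replace_go_single (p : Char) (new : List Char) :
    ∀ (l : List Char) (fuel : Nat) (acc : List Char), l.length ≤ fuel →
      PySem.Chars.replace.go [p] new fuel l acc
        = acc.reverse ++ l.flatMap (fun c => if c == p then new else [c]) := by
  intro l
  induction l with
  | nil =>
    intro fuel acc _
    cases fuel <;> simp [PySem.Chars.replace.go]
  | cons c t ih =>
    intro fuel acc h
    cases fuel with
    | zero => simp at h
    | succ f =>
      have ht : t.length ≤ f := by simpa using Nat.le_of_succ_le_succ h
      by_cases hc : c = p
      · subst hc
        have hpre : [c].isPrefixOf (c :: t) = true := by simp [List.isPrefixOf]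
        rw [PySem.Chars.replace.go, if_pos hpre]
        simp only [List.length_cons, List.drop_succ_cons, List.length_nil, List.drop_zero]
        rw [ih f _ ht]; simp
      · have hpre : [p].isPrefixOf (c :: t) = false := by
          simp [List.isPrefixOf]; exact fun h' => (hc h'.symm).elim
        rw [PySem.Chars.replace.go, if_neg (by simp [hpre])]
        rw [ih f _ ht]; simp [hc]

theorem replace_single (p : Char) (new s : List Char) :
    PySem.Chars.replace s [p] new = s.flatMap (fun c => if c == p then new else [c]) := by
  rw [PySem.Chars.replace, if_neg (by simp)]
  simpa using replace_go_single p new s s.length [] (Nat.le_refl _)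

theorem find_singleton_neg (c : Char) (l : List Char) (h : c ∉ l) :
    PySem.Chars.find l [c] = -1 := by
  rw [PySem.Chars.find_eq_neg_one_iff]
  intro hinf
  exact h (hinf.subset (by simp))

-- ===== VERDICT (by name: the statement is the Claim_ definition above) =====
theorem convert_board_to_unicode_spec : Claim_equal_convert_board_to_unicode := by
  intro s _
  unfold Spec_convert_board_to_unicode
  apply String.toList_injective
  unfold convert_board_to_unicode convert_board_to_unicode_alt
  simp only [List.foldl, PySem.Str.toList_replace, PySem.Str.find_eq,
    PySem.List.foldl_append_singleton_eq_map, PySem.Str.toList_join,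
    (show ("" : String).toList = [] from by decide),
    (show ("r" : String).toList = ['r'] from by decide),
    (show ("♜" : String).toList = ['♜'] from by decide),
    (show ("R" : String).toList = ['R'] from by decide),
    (show ("♖" : String).toList = ['♖'] from by decide),
    (show ("n" : String).toList = ['n'] from by decide),
    (show ("♞" : String).toList = ['♞'] from by decide),
    (show ("N" : String).toList = ['N'] from by decide),
    (show ("♘" : String).toList = ['♘'] from by decide),
    (show ("b" : String).toList = ['b'] from by decide),
    (show ("♝" : String).toList = ['♝'] from by decide),
    (show ("B" : String).toList = ['B'] from by decide),
    (show ("♗" : String).toList = ['♗'] from by decide),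
    (show ("q" : String).toList = ['q'] from by decide),
    (show ("♛" : String).toList = ['♛'] from by decide),
    (show ("Q" : String).toList = ['Q'] from by decide),
    (show ("♕" : String).toList = ['♕'] from by decide),
    (show ("k" : String).toList = ['k'] from by decide),
    (show ("♚" : String).toList = ['♚'] from by decide),
    (show ("K" : String).toList = ['K'] from by decide),
    (show ("♔" : String).toList = ['♔'] from by decide),
    (show ("p" : String).toList = ['p'] from by decide),
    (show ("♟︎" : String).toList = ['♟', '\uFE0E'] from by decide),
    (show ("P" : String).toList = ['P'] from by decide),
    (show ("♙" : String).toList = ['♙'] from by decide)]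
  simp only [replace_single, List.flatMap_assoc, List.nil_append, List.map_map, join_nil_flatten, ← List.flatMap_def]
  congr 1; funext c
  by_cases h0 : c = 'r'
  · subst h0; decide
  by_cases h1 : c = 'R'
  · subst h1; decide
  by_cases h2 : c = 'n'
  · subst h2; decide
  by_cases h3 : c = 'N'
  · subst h3; decide
  by_cases h4 : c = 'b'
  · subst h4; decide
  by_cases h5 : c = 'B'
  · subst h5; decide
  by_cases h6 : c = 'q'
  · subst h6; decide
  by_cases h7 : c = 'Q'
  · subst h7; decide
  by_cases h8 : c = 'k'
  · subst h8; decide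
  by_cases h9 : c = 'K'
  · subst h9; decide
  by_cases h10 : c = 'p'
  · subst h10; decide
  by_cases h11 : c = 'P'
  · subst h11; decide
  have hsing : (String.singleton c).toList = [c] := by
    simp [String.singleton]
  have hfind : PySem.Chars.find ['r','R','n','N','b','B','q','Q','k','K','p','P'] [c] = -1 :=
    find_singleton_neg c _ (by simp [h0, h1, h2, h3, h4, h5, h6, h7, h8, h9, h10, h11])
  simp [Function.comp, hsing, hfind, h0, h1, h2, h3, h4, h5, h6, h7, h8, h9, h10, h11]
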